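-- pv_equiv track=rewrite | github.com/ysjang77-dotcom/obsidian-seminar | scripts/pdf_to_md_inplace_mineru.py | _rewrite_image_paths
-- ===== SOURCE A (Python) =====
-- def _rewrite_image_paths(md_text: str, pdf_stem: str) -> str:
--     # MinerU outputs MD that references images under a sibling ./images directory.
--     # When we move the MD next to the original PDF, we also relocate images to
--     # ./images/<pdf_stem>/, so update links accordingly.
--     replacements = {
--         "(images/": f"(images/{pdf_stem}/",
--         "(./images/": f"(images/{pdf_stem}/",
--         "src=\"images/": f"src=\"images/{pdf_stem}/",
--         "src='images/": f"src='images/{pdf_stem}/",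
--         "src=\"./images/": f"src=\"images/{pdf_stem}/",
--         "src='./images/": f"src='images/{pdf_stem}/",
--     }
--     out = md_text
--     for old, new in replacements.items():
--         out = out.replace(old, new)
--     return out
-- ===== SOURCE B (Python) =====
-- # B: one left-to-right scan that rewrites each occurrence once, instead of six
-- # sequential whole-string replace passes.
-- def _rewrite_image_paths(md_text: str, pdf_stem: str) -> str:
--     block = "images/" + pdf_stem + "/"
--     out = []
--     i = 0
--     n = len(md_text)
--     while i < n:
--         if md_text.startswith("(images/", i):
--             out.append("(" + block); i += 8
--         elif md_text.startswith("(./images/", i):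
--             out.append("(" + block); i += 10
--         elif md_text.startswith("src=\"images/", i):
--             out.append("src=\"" + block); i += 12
--         elif md_text.startswith("src='images/", i):
--             out.append("src='" + block); i += 12
--         elif md_text.startswith("src=\"./images/", i):
--             out.append("src=\"" + block); i += 14
--         elif md_text.startswith("src='./images/", i):
--             out.append("src='" + block); i += 14
--         else:
--             out.append(md_text[i]); i += 1
--     return "".join(out)
-- ===== Notes on version B (the rewrite author's own statement) =====
-- stated objective: alternative
-- what changed: A runs six sequential whole-string str.replace passes (one per link/src pattern); B makes a single left-to-right scan over md_text that matches the six patterns at each position and rewrites each occurrence exactly once.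
-- outside the precondition, e.g. on _rewrite_image_paths('(images/images/x', 'a(.'): A returns '(images/a(images/a(./x', B returns '(images/a(./images/x'
import Mathlib
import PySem

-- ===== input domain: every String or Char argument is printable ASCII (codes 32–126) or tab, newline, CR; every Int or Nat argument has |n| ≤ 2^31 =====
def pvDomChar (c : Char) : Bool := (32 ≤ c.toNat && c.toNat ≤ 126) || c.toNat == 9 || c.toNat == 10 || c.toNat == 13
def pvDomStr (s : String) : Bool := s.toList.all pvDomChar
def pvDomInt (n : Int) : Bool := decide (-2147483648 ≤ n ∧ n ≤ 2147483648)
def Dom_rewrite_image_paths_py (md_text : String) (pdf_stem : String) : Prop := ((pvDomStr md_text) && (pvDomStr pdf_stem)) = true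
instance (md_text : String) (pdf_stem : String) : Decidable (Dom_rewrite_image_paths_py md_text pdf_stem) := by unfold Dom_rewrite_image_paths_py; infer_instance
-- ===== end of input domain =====

-- B replaces A's six sequential whole-string str.replace passes by one explicit
-- left-to-right scan that rewrites each image-path occurrence once (objective:
-- alternative; no speed claim).

-- ===== PORT A =====
def rewrite_image_paths_py (md_text : String) (pdf_stem : String) : String :=
  let replacements : List (String × String) :=
    [("(images/", "(images/" ++ pdf_stem ++ "/"),
     ("(./images/", "(images/" ++ pdf_stem ++ "/"),
     ("src=\"images/", "src=\"images/" ++ pdf_stem ++ "/"),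
     ("src='images/", "src='images/" ++ pdf_stem ++ "/"),
     ("src=\"./images/", "src=\"images/" ++ pdf_stem ++ "/"),
     ("src='./images/", "src='images/" ++ pdf_stem ++ "/")]
  replacements.foldl (fun out pr => PySem.Str.replace out pr.1 pr.2) md_text

-- ===== PORT B =====
-- helper: the while-loop of Source B as a recursion over the remaining characters
def pvScanGo (stem : List Char) (s : List Char) : List Char :=
  match s with
  | [] => []
  | c :: t =>
    if "(images/".toList.isPrefixOf (c :: t) then
      "(images/".toList ++ stem ++ ['/'] ++ pvScanGo stem ((c :: t).drop 8)
    else if "(./images/".toList.isPrefixOf (c :: t) then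
      "(images/".toList ++ stem ++ ['/'] ++ pvScanGo stem ((c :: t).drop 10)
    else if "src=\"images/".toList.isPrefixOf (c :: t) then
      "src=\"images/".toList ++ stem ++ ['/'] ++ pvScanGo stem ((c :: t).drop 12)
    else if "src='images/".toList.isPrefixOf (c :: t) then
      "src='images/".toList ++ stem ++ ['/'] ++ pvScanGo stem ((c :: t).drop 12)
    else if "src=\"./images/".toList.isPrefixOf (c :: t) then
      "src=\"images/".toList ++ stem ++ ['/'] ++ pvScanGo stem ((c :: t).drop 14)
    else if "src='./images/".toList.isPrefixOf (c :: t) then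
      "src='images/".toList ++ stem ++ ['/'] ++ pvScanGo stem ((c :: t).drop 14)
    else c :: pvScanGo stem t
termination_by s.length
decreasing_by all_goals simp [List.length_drop]; try omega

def rewrite_image_paths_py_alt (md_text : String) (pdf_stem : String) : String :=
  String.ofList (pvScanGo pdf_stem.toList md_text.toList)

-- ===== PRECONDITION & SPEC =====
-- a pdf_stem that cannot make text inserted by one replace pass re-match a later pattern
def pvCleanStem (S : List Char) : Prop :=
  ¬ "images".toList <:+: S ∧ ¬ "(.".toList <:+ S ∧ ¬ "src=\".".toList <:+ S ∧ ¬ "src='.".toList <:+ S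

-- Pre_ excludes inputs whose pdf_stem contains "images" or ends in "(.", src=". or src='.
-- while md_text mentions "images" at all: there the text inserted by one of A's six
-- sequential replace passes can itself be re-matched by a later pass, and the cascaded
-- double rewrite is an accident of A's pass order, not a value anyone would specify.
def Pre_rewrite_image_paths_py (md_text : String) (pdf_stem : String) : Prop :=
  pvCleanStem pdf_stem.toList ∨ ¬ "images".toList <:+: md_text.toList

instance (md_text : String) (pdf_stem : String) : Decidable (Pre_rewrite_image_paths_py md_text pdf_stem) := by
  unfold Pre_rewrite_image_paths_py pvCleanStem; infer_instance

def pvWitness_rewrite_image_paths_py : String × String := ("(images/a.png) and src=\"./images/b.png\"", "doc1")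

def Spec_rewrite_image_paths_py (md_text : String) (pdf_stem : String) (out : String) : Prop := out = rewrite_image_paths_py_alt md_text pdf_stem
instance (md_text : String) (pdf_stem : String) (out : String) : Decidable (Spec_rewrite_image_paths_py md_text pdf_stem out) := by unfold Spec_rewrite_image_paths_py; infer_instance

-- ===== CLAIM (what is proved, stated in full; the proofs are below) =====
def Claim_equal_rewrite_image_paths_py : Prop := ∀ (md_text : String) (pdf_stem : String), Dom_rewrite_image_paths_py md_text pdf_stem → Pre_rewrite_image_paths_py md_text pdf_stem → Spec_rewrite_image_paths_py md_text pdf_stem (rewrite_image_paths_py md_text pdf_stem)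

-- ===== LEMMAS AND PROOFS =====

-- A-side model of PySem.Chars.replace.go without the accumulator
def pvRepl (old new : List Char) : Nat → List Char → List Char
  | _, [] => []
  | 0, c :: t => c :: t
  | fuel+1, c :: t =>
    if old.isPrefixOf (c :: t) then new ++ pvRepl old new fuel ((c :: t).drop old.length)
    else c :: pvRepl old new fuel t

theorem pvGo_eq (old new : List Char) : ∀ (fuel : Nat) (l acc : List Char),
    PySem.Chars.replace.go old new fuel l acc = acc.reverse ++ pvRepl old new fuel l := by
  intro fuel
  induction fuel with
  | zero =>
    intro l acc
    cases l with
    | nil => show acc.reverse ++ [] = acc.reverse ++ pvRepl old new 0 [] ; simp [pvRepl]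
    | cons c t => show acc.reverse ++ (c :: t) = _ ; simp [pvRepl]
  | succ f ih =>
    intro l acc
    cases l with
    | nil => show acc.reverse = acc.reverse ++ pvRepl old new (f+1) [] ; simp [pvRepl]
    | cons c t =>
      show (if old.isPrefixOf (c :: t) = true then
          PySem.Chars.replace.go old new f (List.drop old.length (c :: t)) (new.reverse ++ acc)
        else PySem.Chars.replace.go old new f t (c :: acc)) = _
      simp only [pvRepl]
      split
      · rw [ih]; simp [List.append_assoc]
      · rw [ih]; simp

theorem pvReplace_eq {old : List Char} (h : old ≠ []) (new s : List Char) :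
    PySem.Chars.replace s old new = pvRepl old new s.length s := by
  have hne : old.isEmpty = false := by cases old <;> simp_all
  unfold PySem.Chars.replace
  simp [hne, pvGo_eq]

theorem pvRepl_fuel_aux : ∀ (n : Nat) (old new : List Char), old ≠ [] →
    ∀ (l : List Char) (f1 f2 : Nat), l.length ≤ n → l.length ≤ f1 → l.length ≤ f2 →
    pvRepl old new f1 l = pvRepl old new f2 l := by
  intro n
  induction n with
  | zero =>
    intro old new _ l f1 f2 hn _ _
    have hnil : l = [] := by cases l <;> simp_all
    subst hnil
    cases f1 <;> cases f2 <;> simp [pvRepl]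
  | succ n ih =>
    intro old new h l f1 f2 hn h1 h2
    cases l with
    | nil => cases f1 <;> cases f2 <;> simp [pvRepl]
    | cons c t =>
      cases f1 with
      | zero => simp at h1
      | succ g1 =>
        cases f2 with
        | zero => simp at h2
        | succ g2 =>
          have hol : 1 ≤ old.length := by cases old <;> simp_all
          have hn' : t.length + 1 ≤ n + 1 := by simpa using hn
          have h1' : t.length + 1 ≤ g1 + 1 := by simpa using h1
          have h2' : t.length + 1 ≤ g2 + 1 := by simpa using h2
          simp only [pvRepl]
          split
          · rw [ih old new h _ g1 g2 (by simp only [List.length_drop, List.length_cons]; omega)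
              (by simp only [List.length_drop, List.length_cons]; omega)
              (by simp only [List.length_drop, List.length_cons]; omega)]
          · rw [ih old new h t g1 g2 (by omega) (by omega) (by omega)]

theorem pvRepl_fuel {old : List Char} (h : old ≠ []) (new l : List Char) {f1 f2 : Nat}
    (h1 : l.length ≤ f1) (h2 : l.length ≤ f2) :
    pvRepl old new f1 l = pvRepl old new f2 l :=
  pvRepl_fuel_aux l.length old new h l f1 f2 le_rfl h1 h2

theorem pvRepl_to_replace {old : List Char} (h : old ≠ []) (new : List Char) {f : Nat} (l : List Char)
    (hf : l.length ≤ f) : pvRepl old new f l = PySem.Chars.replace l old new := by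
  rw [pvReplace_eq h, pvRepl_fuel h new l hf le_rfl]

-- pointwise mismatch within the zipped region
def pvMism (X f : List Char) : Bool := (X.zip f).any fun ab => ab.1 != ab.2

theorem pvMism_kill {X f : List Char} (h : pvMism X f = true) (w : List Char) : ¬ X <+: f ++ w := by
  intro hp
  rcases List.any_eq_true.mp h with ⟨ab, hmem, hne⟩
  obtain ⟨i, hi, hget⟩ := List.getElem_of_mem hmem
  have hi' : i < min X.length f.length := List.length_zip ▸ hi
  have hiX : i < X.length := lt_of_lt_of_le hi' (min_le_left _ _)
  have hif : i < f.length := lt_of_lt_of_le hi' (min_le_right _ _)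
  rw [List.getElem_zip] at hget
  rw [← hget] at hne
  have hxy : X[i] ≠ f[i] := by simpa using hne
  obtain ⟨r, hr⟩ := hp
  have h1 : (X ++ r)[i]'(by simp only [List.length_append]; omega) = X[i] := List.getElem_append_left hiX
  have h2 : (f ++ w)[i]'(by simp only [List.length_append]; omega) = f[i] := List.getElem_append_left hif
  have h3 : (X ++ r)[i]'(by simp only [List.length_append]; omega) =
      (f ++ w)[i]'(by simp only [List.length_append]; omega) := List.getElem_of_eq hr _
  exact hxy ((h1.symm.trans h3).trans h2)

theorem pvClean_of_mism (p E : List Char) (h : ∀ k, k < E.length → pvMism p (E.drop k) = true) :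
    ∀ k, k < E.length → ∀ u, ¬ p <+: (E.drop k ++ u) :=
  fun k hk u => pvMism_kill (h k hk) u

theorem pvDropAppend (l₁ l₂ : List Char) : ∀ (k : Nat), k ≤ l₁.length → (l₁ ++ l₂).drop k = l₁.drop k ++ l₂ := by
  induction l₁ with
  | nil => intro k hk; have hk0 : k = 0 := Nat.le_zero.mp (by simpa using hk); subst hk0; simp
  | cons a l₁ ih =>
    intro k hk
    cases k with
    | zero => simp
    | succ k => simpa using ih k (by simpa using hk)

theorem pvDropAppend2 (l₁ l₂ : List Char) : ∀ (k : Nat), l₁.length ≤ k → (l₁ ++ l₂).drop k = l₂.drop (k - l₁.length) := by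
  induction l₁ with
  | nil => intro k _; simp
  | cons a l₁ ih =>
    intro k hk
    cases k with
    | zero => simp at hk
    | succ k => simpa using ih k (by simpa using hk)

theorem pvTakeAppend (l₁ l₂ : List Char) : ∀ (k : Nat), k ≤ l₁.length → (l₁ ++ l₂).take k = l₁.take k := by
  induction l₁ with
  | nil => intro k hk; have hk0 : k = 0 := Nat.le_zero.mp (by simpa using hk); subst hk0; simp
  | cons a l₁ ih =>
    intro k hk
    cases k with
    | zero => simp
    | succ k => simpa using ih k (by simpa using hk)

-- ## the Chars.replace workhorse lemmas

theorem pvChars_nil (old new : List Char) (h : old ≠ []) :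
    PySem.Chars.replace [] old new = [] := by
  rw [pvReplace_eq h]; simp [pvRepl]

theorem pvChars_cons (old new : List Char) (h : old ≠ []) {c : Char} {t : List Char}
    (hnp : ¬ old <+: c :: t) :
    PySem.Chars.replace (c :: t) old new = c :: PySem.Chars.replace t old new := by
  rw [pvReplace_eq h, pvReplace_eq h]
  show pvRepl old new (t.length + 1) (c :: t) = _
  simp only [pvRepl]
  rw [if_neg (by simpa [List.isPrefixOf_iff_prefix] using hnp)]

theorem pvChars_head (old new w : List Char) (h : old ≠ []) :
    PySem.Chars.replace (old ++ w) old new = new ++ PySem.Chars.replace w old new := by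
  rw [pvReplace_eq h]
  cases old with
  | nil => exact absurd rfl h
  | cons o ot =>
    show pvRepl (o :: ot) new ((ot ++ w).length + 1) (o :: (ot ++ w)) = _
    simp only [pvRepl]
    rw [if_pos (by rw [List.isPrefixOf_iff_prefix]; exact ⟨w, rfl⟩)]
    have hdrop : (o :: (ot ++ w)).drop (o :: ot).length = w := by
      show (ot ++ w).drop ot.length = w
      rw [pvDropAppend2 ot w ot.length le_rfl]; simp
    rw [hdrop, pvRepl_to_replace h new w (by simp)]

theorem pvChars_pass (old new E t : List Char) (h : old ≠ [])
    (hcl : ∀ k, k < E.length → ∀ u, ¬ old <+: (E.drop k ++ u)) :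
    PySem.Chars.replace (E ++ t) old new = E ++ PySem.Chars.replace t old new := by
  induction E with
  | nil => simp
  | cons e E' ih =>
    have h0 : ¬ old <+: (e :: (E' ++ t)) := by
      have hx := hcl 0 (by simp) t; simpa using hx
    rw [show (e :: E') ++ t = e :: (E' ++ t) from rfl, pvChars_cons old new h h0,
      ih (fun k hk u => by have hx := hcl (k+1) (by simp; omega) u; simpa using hx)]
    rfl

theorem pvChars_id (old new l : List Char) (h : old ≠ [])
    (hno : ∀ j, ¬ old <+: l.drop j) : PySem.Chars.replace l old new = l := by
  induction l with
  | nil => exact pvChars_nil old new h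
  | cons c t ih =>
    rw [pvChars_cons old new h (by have hx := hno 0; simpa using hx),
      ih (fun j => by have hx := hno (j+1); simpa using hx)]

theorem pvRepl_track (old new p' fix rest : List Char) (hold : old ≠ [])
    (hnew : new = fix ++ rest)
    (hsafe : ∀ m, m < p'.length → 1 ≤ m → pvMism (p'.drop m) fix = true) :
    ∀ (n : Nat) (l : List Char) (f : Nat), l.length ≤ n → l.length ≤ f →
    ∀ m, 1 ≤ m → (hm : m < p'.length) → p'.drop m <+: pvRepl old new f l → p'.drop m <+: l := by
  intro n
  induction n with
  | zero =>
    intro l f hn _ m hm1 hm2 hpre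
    have hnil : l = [] := by cases l <;> simp_all
    subst hnil
    have hz : pvRepl old new f [] = [] := by cases f <;> simp [pvRepl]
    rw [hz] at hpre
    have he := List.prefix_nil.mp hpre
    have hlen := congrArg List.length he
    simp at hlen
    omega
  | succ n ih =>
    intro l f hn hf m hm1 hm2 hpre
    cases l with
    | nil =>
      have hz : pvRepl old new f [] = [] := by cases f <;> simp [pvRepl]
      rw [hz] at hpre
      have he := List.prefix_nil.mp hpre
      have hlen := congrArg List.length he
      simp at hlen
      omega
    | cons c t =>
      cases f with
      | zero => simp at hf
      | succ g =>
        simp only [pvRepl] at hpre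
        split at hpre
        · rw [hnew, List.append_assoc] at hpre
          exact absurd hpre (pvMism_kill (hsafe m hm2 hm1) _)
        · have hd : p'.drop m = p'[m] :: p'.drop (m+1) := List.drop_eq_getElem_cons hm2
          rw [hd] at hpre
          obtain ⟨hc, htail⟩ := List.cons_prefix_cons.mp hpre
          by_cases hm3 : m + 1 < p'.length
          · have hrec := ih t g (by simp at hn; omega) (by simp at hf; omega) (m+1) (by omega) hm3 htail
            rw [hd]
            exact List.cons_prefix_cons.mpr ⟨hc, hrec⟩
          · have hnil : p'.drop (m+1) = [] := List.drop_eq_nil_of_le (by omega)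
            rw [hd, hnil]
            exact List.cons_prefix_cons.mpr ⟨hc, List.nil_prefix⟩

theorem pvChars_keep (old new p' fix rest : List Char) (hold : old ≠ []) (hp' : p' ≠ [])
    (hnew : new = fix ++ rest)
    (hsafe : ∀ m, m < p'.length → 1 ≤ m → pvMism (p'.drop m) fix = true)
    {l : List Char} (h1 : ¬ p' <+: l) (h2 : ¬ old <+: l) :
    ¬ p' <+: PySem.Chars.replace l old new := by
  rw [pvReplace_eq hold]
  intro hpre
  cases l with
  | nil =>
    have hz : pvRepl old new ([] : List Char).length [] = [] := by simp [pvRepl]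
    rw [hz] at hpre
    exact hp' (List.prefix_nil.mp hpre)
  | cons c t =>
    have hshape : pvRepl old new (c :: t).length (c :: t) = c :: pvRepl old new t.length t := by
      show pvRepl old new (t.length + 1) (c :: t) = _
      simp only [pvRepl]
      rw [if_neg (by simpa [List.isPrefixOf_iff_prefix] using h2)]
    rw [hshape] at hpre
    cases p' with
    | nil => exact hp' rfl
    | cons a p'' =>
      obtain ⟨hac, htail⟩ := List.cons_prefix_cons.mp hpre
      cases p'' with
      | nil =>
        subst hac
        exact h1 (List.cons_prefix_cons.mpr ⟨rfl, List.nil_prefix⟩)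
      | cons b p₃ =>
        have hm : (1 : Nat) < (a :: b :: p₃).length := by simp
        have hrec := pvRepl_track old new (a :: b :: p₃) fix rest hold hnew hsafe
          t.length t t.length le_rfl le_rfl 1 le_rfl hm htail
        subst hac
        exact h1 (List.cons_prefix_cons.mpr ⟨rfl, hrec⟩)

-- ## the stem-dependent cleanliness of an inserted block

theorem pvGetD_eq {l : List Char} {n : Nat} (h : n < l.length) (d : Char) : l.getD n d = l[n] := by
  simp [List.getD_eq_getElem?_getD, List.getElem?_eq_getElem h]

theorem pvKills (p : List Char) (himg : "images".toList <:+: p)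
    (henum : ∀ n, n < p.length → p.getD n ' ' = '/' →
      (p.take n = "(.".toList ∨ p.take n = "src=\".".toList ∨ p.take n = "src='.".toList ∨
        "images".toList <:+: p.take n))
    {S : List Char} (hc : pvCleanStem S) : ∀ (j : Nat) (u : List Char), ¬ p <+: (S.drop j ++ '/' :: u) := by
  intro j u hp
  have hTs : S.drop j <:+ S := List.drop_suffix j S
  obtain ⟨r, hr⟩ := hp
  by_cases hlen : p.length ≤ (S.drop j).length
  · have hpt : p = (S.drop j).take p.length := by
      calc p = (p ++ r).take p.length := by rw [pvTakeAppend p r p.length le_rfl, List.take_length]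
        _ = (S.drop j ++ '/' :: u).take p.length := by rw [hr]
        _ = (S.drop j).take p.length := pvTakeAppend _ _ p.length hlen
    have hpre : p <+: S.drop j := by
      conv_lhs => rw [hpt]
      exact List.take_prefix _ _
    exact hc.1 (himg.trans (hpre.isInfix.trans hTs.isInfix))
  · have hTlt : (S.drop j).length < p.length := by omega
    have hTtake : S.drop j = p.take (S.drop j).length := by
      calc S.drop j = (S.drop j ++ '/' :: u).take (S.drop j).length := by
            rw [pvTakeAppend _ _ _ le_rfl, List.take_length]
        _ = (p ++ r).take (S.drop j).length := by rw [hr]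
        _ = p.take (S.drop j).length := pvTakeAppend p r _ (by omega)
    have hslash : p.getD (S.drop j).length ' ' = '/' := by
      rw [pvGetD_eq hTlt]
      have e1 : (p ++ r)[(S.drop j).length]'(by simp only [List.length_append]; omega) = p[(S.drop j).length] :=
        List.getElem_append_left hTlt
      have e3 : (p ++ r)[(S.drop j).length]'(by simp only [List.length_append]; omega) =
          (S.drop j ++ '/' :: u)[(S.drop j).length]'(by simp) := List.getElem_of_eq hr _
      have e2 : (S.drop j ++ '/' :: u)[(S.drop j).length]'(by simp) = '/' := by
        rw [List.getElem_append_right le_rfl]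
        simp
      rw [← e1, e3, e2]
    rcases henum (S.drop j).length hTlt hslash with h | h | h | h
    · have hx := hTs; rw [hTtake, h] at hx; exact hc.2.1 hx
    · have hx := hTs; rw [hTtake, h] at hx; exact hc.2.2.1 hx
    · have hx := hTs; rw [hTtake, h] at hx; exact hc.2.2.2 hx
    · rw [← hTtake] at h
      exact hc.1 (h.trans hTs.isInfix)

theorem pvClean_block (p fix S : List Char)
    (hfix : ∀ k, k < fix.length → pvMism p (fix.drop k) = true)
    (hkill : ∀ (j : Nat) (u : List Char), ¬ p <+: (S.drop j ++ '/' :: u)) :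
    ∀ k, k < (fix ++ (S ++ ['/'])).length → ∀ u, ¬ p <+: ((fix ++ (S ++ ['/'])).drop k ++ u) := by
  intro k hk u hp
  by_cases hkf : k < fix.length
  · rw [pvDropAppend fix (S ++ ['/']) k (le_of_lt hkf), List.append_assoc] at hp
    exact pvMism_kill (hfix k hkf) _ hp
  · have hk2 : fix.length ≤ k := by omega
    rw [pvDropAppend2 fix (S ++ ['/']) k hk2] at hp
    have hj : k - fix.length ≤ S.length := by simp [List.length_append] at hk; omega
    rw [pvDropAppend S ['/'] _ hj, List.append_assoc] at hp
    exact hkill (k - fix.length) u hp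

theorem pvNoOcc {p l : List Char} (himg : "images".toList <:+: p)
    (h : ¬ "images".toList <:+: l) : ∀ j, ¬ p <+: l.drop j :=
  fun j hp => h (himg.trans (hp.isInfix.trans (List.drop_suffix j l).isInfix))

-- ## the chain of A's six passes, at the character level

def pvChain (S l : List Char) : List Char :=
  PySem.Chars.replace (PySem.Chars.replace (PySem.Chars.replace (PySem.Chars.replace (PySem.Chars.replace (PySem.Chars.replace (l) "(images/".toList ("(images/".toList ++ (S ++ ['/']))) "(./images/".toList ("(images/".toList ++ (S ++ ['/']))) "src=\"images/".toList ("src=\"images/".toList ++ (S ++ ['/']))) "src='images/".toList ("src='images/".toList ++ (S ++ ['/']))) "src=\"./images/".toList ("src=\"images/".toList ++ (S ++ ['/']))) "src='./images/".toList ("src='images/".toList ++ (S ++ ['/']))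

-- ## scan equations

theorem pvScan_nil (S : List Char) : pvScanGo S [] = [] := by
  simp [pvScanGo]


theorem pvScan1 (S t : List Char) : pvScanGo S ("(images/".toList ++ t) =
    "(images/".toList ++ S ++ ['/'] ++ pvScanGo S t := by
  show pvScanGo S ('('::'i'::'m'::'a'::'g'::'e'::'s'::'/'::t) = _
  rw [pvScanGo]
  rw [if_pos (by rw [List.isPrefixOf_iff_prefix]; exact ⟨t, rfl⟩)]
  rfl

theorem pvScan2 (S t : List Char) : pvScanGo S ("(./images/".toList ++ t) =
    "(images/".toList ++ S ++ ['/'] ++ pvScanGo S t := by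
  show pvScanGo S ('('::'.'::'/'::'i'::'m'::'a'::'g'::'e'::'s'::'/'::t) = _
  rw [pvScanGo]
  rw [if_neg (by simp only [List.isPrefixOf_iff_prefix]; exact pvMism_kill (X := "(images/".toList) (f := "(./images/".toList) (by decide) t)]
  rw [if_pos (by rw [List.isPrefixOf_iff_prefix]; exact ⟨t, rfl⟩)]
  rfl

theorem pvScan3 (S t : List Char) : pvScanGo S ("src=\"images/".toList ++ t) =
    "src=\"images/".toList ++ S ++ ['/'] ++ pvScanGo S t := by
  show pvScanGo S ('s'::'r'::'c'::'='::'"'::'i'::'m'::'a'::'g'::'e'::'s'::'/'::t) = _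
  rw [pvScanGo]
  rw [if_neg (by simp only [List.isPrefixOf_iff_prefix]; exact pvMism_kill (X := "(images/".toList) (f := "src=\"images/".toList) (by decide) t)]
  rw [if_neg (by simp only [List.isPrefixOf_iff_prefix]; exact pvMism_kill (X := "(./images/".toList) (f := "src=\"images/".toList) (by decide) t)]
  rw [if_pos (by rw [List.isPrefixOf_iff_prefix]; exact ⟨t, rfl⟩)]
  rfl

theorem pvScan4 (S t : List Char) : pvScanGo S ("src='images/".toList ++ t) =
    "src='images/".toList ++ S ++ ['/'] ++ pvScanGo S t := by
  show pvScanGo S ('s'::'r'::'c'::'='::'\''::'i'::'m'::'a'::'g'::'e'::'s'::'/'::t) = _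
  rw [pvScanGo]
  rw [if_neg (by simp only [List.isPrefixOf_iff_prefix]; exact pvMism_kill (X := "(images/".toList) (f := "src='images/".toList) (by decide) t)]
  rw [if_neg (by simp only [List.isPrefixOf_iff_prefix]; exact pvMism_kill (X := "(./images/".toList) (f := "src='images/".toList) (by decide) t)]
  rw [if_neg (by simp only [List.isPrefixOf_iff_prefix]; exact pvMism_kill (X := "src=\"images/".toList) (f := "src='images/".toList) (by decide) t)]
  rw [if_pos (by rw [List.isPrefixOf_iff_prefix]; exact ⟨t, rfl⟩)]
  rfl

theorem pvScan5 (S t : List Char) : pvScanGo S ("src=\"./images/".toList ++ t) =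
    "src=\"images/".toList ++ S ++ ['/'] ++ pvScanGo S t := by
  show pvScanGo S ('s'::'r'::'c'::'='::'"'::'.'::'/'::'i'::'m'::'a'::'g'::'e'::'s'::'/'::t) = _
  rw [pvScanGo]
  rw [if_neg (by simp only [List.isPrefixOf_iff_prefix]; exact pvMism_kill (X := "(images/".toList) (f := "src=\"./images/".toList) (by decide) t)]
  rw [if_neg (by simp only [List.isPrefixOf_iff_prefix]; exact pvMism_kill (X := "(./images/".toList) (f := "src=\"./images/".toList) (by decide) t)]
  rw [if_neg (by simp only [List.isPrefixOf_iff_prefix]; exact pvMism_kill (X := "src=\"images/".toList) (f := "src=\"./images/".toList) (by decide) t)]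
  rw [if_neg (by simp only [List.isPrefixOf_iff_prefix]; exact pvMism_kill (X := "src='images/".toList) (f := "src=\"./images/".toList) (by decide) t)]
  rw [if_pos (by rw [List.isPrefixOf_iff_prefix]; exact ⟨t, rfl⟩)]
  rfl

theorem pvScan6 (S t : List Char) : pvScanGo S ("src='./images/".toList ++ t) =
    "src='images/".toList ++ S ++ ['/'] ++ pvScanGo S t := by
  show pvScanGo S ('s'::'r'::'c'::'='::'\''::'.'::'/'::'i'::'m'::'a'::'g'::'e'::'s'::'/'::t) = _
  rw [pvScanGo]
  rw [if_neg (by simp only [List.isPrefixOf_iff_prefix]; exact pvMism_kill (X := "(images/".toList) (f := "src='./images/".toList) (by decide) t)]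
  rw [if_neg (by simp only [List.isPrefixOf_iff_prefix]; exact pvMism_kill (X := "(./images/".toList) (f := "src='./images/".toList) (by decide) t)]
  rw [if_neg (by simp only [List.isPrefixOf_iff_prefix]; exact pvMism_kill (X := "src=\"images/".toList) (f := "src='./images/".toList) (by decide) t)]
  rw [if_neg (by simp only [List.isPrefixOf_iff_prefix]; exact pvMism_kill (X := "src='images/".toList) (f := "src='./images/".toList) (by decide) t)]
  rw [if_neg (by simp only [List.isPrefixOf_iff_prefix]; exact pvMism_kill (X := "src=\"./images/".toList) (f := "src='./images/".toList) (by decide) t)]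
  rw [if_pos (by rw [List.isPrefixOf_iff_prefix]; exact ⟨t, rfl⟩)]
  rfl

theorem pvScan_cons (S : List Char) {c : Char} {t : List Char}
    (h1 : ¬ "(images/".toList <+: c :: t) (h2 : ¬ "(./images/".toList <+: c :: t)
    (h3 : ¬ "src=\"images/".toList <+: c :: t) (h4 : ¬ "src='images/".toList <+: c :: t)
    (h5 : ¬ "src=\"./images/".toList <+: c :: t) (h6 : ¬ "src='./images/".toList <+: c :: t) :
    pvScanGo S (c :: t) = c :: pvScanGo S t := by
  rw [pvScanGo]
  rw [if_neg (by simpa [List.isPrefixOf_iff_prefix] using h1),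
    if_neg (by simpa [List.isPrefixOf_iff_prefix] using h2),
    if_neg (by simpa [List.isPrefixOf_iff_prefix] using h3),
    if_neg (by simpa [List.isPrefixOf_iff_prefix] using h4),
    if_neg (by simpa [List.isPrefixOf_iff_prefix] using h5),
    if_neg (by simpa [List.isPrefixOf_iff_prefix] using h6)]

theorem pvScan_id (S : List Char) : ∀ (l : List Char), ¬ "images".toList <:+: l → pvScanGo S l = l := by
  intro l
  induction l with
  | nil => intro _; exact pvScan_nil S
  | cons c t ih =>
    intro h
    have ht : ¬ "images".toList <:+: t := fun hx => h (hx.trans (List.suffix_cons c t).isInfix)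
    rw [pvScan_cons S (pvNoOcc (by decide) h 0) (pvNoOcc (by decide) h 0)
      (pvNoOcc (by decide) h 0) (pvNoOcc (by decide) h 0)
      (pvNoOcc (by decide) h 0) (pvNoOcc (by decide) h 0), ih ht]


theorem pvChain_id (S : List Char) {l : List Char} (h : ¬ "images".toList <:+: l) :
    pvChain S l = l := by
  unfold pvChain
  rw [pvChars_id "(images/".toList ("(images/".toList ++ (S ++ ['/'])) l (by decide) (pvNoOcc (by decide) h)]
  rw [pvChars_id "(./images/".toList ("(images/".toList ++ (S ++ ['/'])) l (by decide) (pvNoOcc (by decide) h)]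
  rw [pvChars_id "src=\"images/".toList ("src=\"images/".toList ++ (S ++ ['/'])) l (by decide) (pvNoOcc (by decide) h)]
  rw [pvChars_id "src='images/".toList ("src='images/".toList ++ (S ++ ['/'])) l (by decide) (pvNoOcc (by decide) h)]
  rw [pvChars_id "src=\"./images/".toList ("src=\"images/".toList ++ (S ++ ['/'])) l (by decide) (pvNoOcc (by decide) h)]
  rw [pvChars_id "src='./images/".toList ("src='images/".toList ++ (S ++ ['/'])) l (by decide) (pvNoOcc (by decide) h)]

theorem pvChain_eq (S : List Char) (hc : pvCleanStem S) :
    ∀ (n : Nat) (l : List Char), l.length ≤ n → pvChain S l = pvScanGo S l := by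
  intro n
  induction n with
  | zero =>
    intro l hl
    have hnil : l = [] := by cases l <;> simp_all
    subst hnil
    rw [pvScan_nil]
    exact pvChain_id S (by decide)
  | succ n ih =>
    intro l hl
    by_cases h1 : "(images/".toList <+: l
    · obtain ⟨t, rfl⟩ := h1
      have hlt : t.length ≤ n := by
        have hx := hl; simp [List.length_append, (show ("(images/".toList).length = 8 from rfl)] at hx; omega
      have hchain : pvChain S ("(images/".toList ++ t) =
          "(images/".toList ++ S ++ ['/'] ++ pvChain S t := by
        unfold pvChain
        rw [pvChars_head "(images/".toList ("(images/".toList ++ (S ++ ['/'])) (t) (by decide)]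
        rw [pvChars_pass "(./images/".toList ("(images/".toList ++ (S ++ ['/'])) ("(images/".toList ++ (S ++ ['/'])) (PySem.Chars.replace (t) "(images/".toList ("(images/".toList ++ (S ++ ['/']))) (by decide) (pvClean_block "(./images/".toList ("(images/".toList) S (by decide) (pvKills "(./images/".toList (by decide) (by decide) hc))]
        rw [pvChars_pass "src=\"images/".toList ("src=\"images/".toList ++ (S ++ ['/'])) ("(images/".toList ++ (S ++ ['/'])) (PySem.Chars.replace (PySem.Chars.replace (t) "(images/".toList ("(images/".toList ++ (S ++ ['/']))) "(./images/".toList ("(images/".toList ++ (S ++ ['/']))) (by decide) (pvClean_block "src=\"images/".toList ("(images/".toList) S (by decide) (pvKills "src=\"images/".toList (by decide) (by decide) hc))]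
        rw [pvChars_pass "src='images/".toList ("src='images/".toList ++ (S ++ ['/'])) ("(images/".toList ++ (S ++ ['/'])) (PySem.Chars.replace (PySem.Chars.replace (PySem.Chars.replace (t) "(images/".toList ("(images/".toList ++ (S ++ ['/']))) "(./images/".toList ("(images/".toList ++ (S ++ ['/']))) "src=\"images/".toList ("src=\"images/".toList ++ (S ++ ['/']))) (by decide) (pvClean_block "src='images/".toList ("(images/".toList) S (by decide) (pvKills "src='images/".toList (by decide) (by decide) hc))]
        rw [pvChars_pass "src=\"./images/".toList ("src=\"images/".toList ++ (S ++ ['/'])) ("(images/".toList ++ (S ++ ['/'])) (PySem.Chars.replace (PySem.Chars.replace (PySem.Chars.replace (PySem.Chars.replace (t) "(images/".toList ("(images/".toList ++ (S ++ ['/']))) "(./images/".toList ("(images/".toList ++ (S ++ ['/']))) "src=\"images/".toList ("src=\"images/".toList ++ (S ++ ['/']))) "src='images/".toList ("src='images/".toList ++ (S ++ ['/']))) (by decide) (pvClean_block "src=\"./images/".toList ("(images/".toList) S (by decide) (pvKills "src=\"./images/".toList (by decide) (by decide) hc))]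
        rw [pvChars_pass "src='./images/".toList ("src='images/".toList ++ (S ++ ['/'])) ("(images/".toList ++ (S ++ ['/'])) (PySem.Chars.replace (PySem.Chars.replace (PySem.Chars.replace (PySem.Chars.replace (PySem.Chars.replace (t) "(images/".toList ("(images/".toList ++ (S ++ ['/']))) "(./images/".toList ("(images/".toList ++ (S ++ ['/']))) "src=\"images/".toList ("src=\"images/".toList ++ (S ++ ['/']))) "src='images/".toList ("src='images/".toList ++ (S ++ ['/']))) "src=\"./images/".toList ("src=\"images/".toList ++ (S ++ ['/']))) (by decide) (pvClean_block "src='./images/".toList ("(images/".toList) S (by decide) (pvKills "src='./images/".toList (by decide) (by decide) hc))]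
        simp [List.append_assoc]
      rw [hchain, ih t hlt, pvScan1]
    by_cases h2 : "(./images/".toList <+: l
    · obtain ⟨t, rfl⟩ := h2
      have hlt : t.length ≤ n := by
        have hx := hl; simp [List.length_append, (show ("(./images/".toList).length = 10 from rfl)] at hx; omega
      have hchain : pvChain S ("(./images/".toList ++ t) =
          "(images/".toList ++ S ++ ['/'] ++ pvChain S t := by
        unfold pvChain
        rw [pvChars_pass "(images/".toList ("(images/".toList ++ (S ++ ['/'])) ("(./images/".toList) (t) (by decide) (pvClean_of_mism "(images/".toList ("(./images/".toList) (by decide))]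
        rw [pvChars_head "(./images/".toList ("(images/".toList ++ (S ++ ['/'])) (PySem.Chars.replace (t) "(images/".toList ("(images/".toList ++ (S ++ ['/']))) (by decide)]
        rw [pvChars_pass "src=\"images/".toList ("src=\"images/".toList ++ (S ++ ['/'])) ("(images/".toList ++ (S ++ ['/'])) (PySem.Chars.replace (PySem.Chars.replace (t) "(images/".toList ("(images/".toList ++ (S ++ ['/']))) "(./images/".toList ("(images/".toList ++ (S ++ ['/']))) (by decide) (pvClean_block "src=\"images/".toList ("(images/".toList) S (by decide) (pvKills "src=\"images/".toList (by decide) (by decide) hc))]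
        rw [pvChars_pass "src='images/".toList ("src='images/".toList ++ (S ++ ['/'])) ("(images/".toList ++ (S ++ ['/'])) (PySem.Chars.replace (PySem.Chars.replace (PySem.Chars.replace (t) "(images/".toList ("(images/".toList ++ (S ++ ['/']))) "(./images/".toList ("(images/".toList ++ (S ++ ['/']))) "src=\"images/".toList ("src=\"images/".toList ++ (S ++ ['/']))) (by decide) (pvClean_block "src='images/".toList ("(images/".toList) S (by decide) (pvKills "src='images/".toList (by decide) (by decide) hc))]
        rw [pvChars_pass "src=\"./images/".toList ("src=\"images/".toList ++ (S ++ ['/'])) ("(images/".toList ++ (S ++ ['/'])) (PySem.Chars.replace (PySem.Chars.replace (PySem.Chars.replace (PySem.Chars.replace (t) "(images/".toList ("(images/".toList ++ (S ++ ['/']))) "(./images/".toList ("(images/".toList ++ (S ++ ['/']))) "src=\"images/".toList ("src=\"images/".toList ++ (S ++ ['/']))) "src='images/".toList ("src='images/".toList ++ (S ++ ['/']))) (by decide) (pvClean_block "src=\"./images/".toList ("(images/".toList) S (by decide) (pvKills "src=\"./images/".toList (by decide) (by decide) hc))]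
        rw [pvChars_pass "src='./images/".toList ("src='images/".toList ++ (S ++ ['/'])) ("(images/".toList ++ (S ++ ['/'])) (PySem.Chars.replace (PySem.Chars.replace (PySem.Chars.replace (PySem.Chars.replace (PySem.Chars.replace (t) "(images/".toList ("(images/".toList ++ (S ++ ['/']))) "(./images/".toList ("(images/".toList ++ (S ++ ['/']))) "src=\"images/".toList ("src=\"images/".toList ++ (S ++ ['/']))) "src='images/".toList ("src='images/".toList ++ (S ++ ['/']))) "src=\"./images/".toList ("src=\"images/".toList ++ (S ++ ['/']))) (by decide) (pvClean_block "src='./images/".toList ("(images/".toList) S (by decide) (pvKills "src='./images/".toList (by decide) (by decide) hc))]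
        simp [List.append_assoc]
      rw [hchain, ih t hlt, pvScan2]
    by_cases h3 : "src=\"images/".toList <+: l
    · obtain ⟨t, rfl⟩ := h3
      have hlt : t.length ≤ n := by
        have hx := hl; simp [List.length_append, (show ("src=\"images/".toList).length = 12 from rfl)] at hx; omega
      have hchain : pvChain S ("src=\"images/".toList ++ t) =
          "src=\"images/".toList ++ S ++ ['/'] ++ pvChain S t := by
        unfold pvChain
        rw [pvChars_pass "(images/".toList ("(images/".toList ++ (S ++ ['/'])) ("src=\"images/".toList) (t) (by decide) (pvClean_of_mism "(images/".toList ("src=\"images/".toList) (by decide))]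
        rw [pvChars_pass "(./images/".toList ("(images/".toList ++ (S ++ ['/'])) ("src=\"images/".toList) (PySem.Chars.replace (t) "(images/".toList ("(images/".toList ++ (S ++ ['/']))) (by decide) (pvClean_of_mism "(./images/".toList ("src=\"images/".toList) (by decide))]
        rw [pvChars_head "src=\"images/".toList ("src=\"images/".toList ++ (S ++ ['/'])) (PySem.Chars.replace (PySem.Chars.replace (t) "(images/".toList ("(images/".toList ++ (S ++ ['/']))) "(./images/".toList ("(images/".toList ++ (S ++ ['/']))) (by decide)]
        rw [pvChars_pass "src='images/".toList ("src='images/".toList ++ (S ++ ['/'])) ("src=\"images/".toList ++ (S ++ ['/'])) (PySem.Chars.replace (PySem.Chars.replace (PySem.Chars.replace (t) "(images/".toList ("(images/".toList ++ (S ++ ['/']))) "(./images/".toList ("(images/".toList ++ (S ++ ['/']))) "src=\"images/".toList ("src=\"images/".toList ++ (S ++ ['/']))) (by decide) (pvClean_block "src='images/".toList ("src=\"images/".toList) S (by decide) (pvKills "src='images/".toList (by decide) (by decide) hc))]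
        rw [pvChars_pass "src=\"./images/".toList ("src=\"images/".toList ++ (S ++ ['/'])) ("src=\"images/".toList ++ (S ++ ['/'])) (PySem.Chars.replace (PySem.Chars.replace (PySem.Chars.replace (PySem.Chars.replace (t) "(images/".toList ("(images/".toList ++ (S ++ ['/']))) "(./images/".toList ("(images/".toList ++ (S ++ ['/']))) "src=\"images/".toList ("src=\"images/".toList ++ (S ++ ['/']))) "src='images/".toList ("src='images/".toList ++ (S ++ ['/']))) (by decide) (pvClean_block "src=\"./images/".toList ("src=\"images/".toList) S (by decide) (pvKills "src=\"./images/".toList (by decide) (by decide) hc))]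
        rw [pvChars_pass "src='./images/".toList ("src='images/".toList ++ (S ++ ['/'])) ("src=\"images/".toList ++ (S ++ ['/'])) (PySem.Chars.replace (PySem.Chars.replace (PySem.Chars.replace (PySem.Chars.replace (PySem.Chars.replace (t) "(images/".toList ("(images/".toList ++ (S ++ ['/']))) "(./images/".toList ("(images/".toList ++ (S ++ ['/']))) "src=\"images/".toList ("src=\"images/".toList ++ (S ++ ['/']))) "src='images/".toList ("src='images/".toList ++ (S ++ ['/']))) "src=\"./images/".toList ("src=\"images/".toList ++ (S ++ ['/']))) (by decide) (pvClean_block "src='./images/".toList ("src=\"images/".toList) S (by decide) (pvKills "src='./images/".toList (by decide) (by decide) hc))]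
        simp [List.append_assoc]
      rw [hchain, ih t hlt, pvScan3]
    by_cases h4 : "src='images/".toList <+: l
    · obtain ⟨t, rfl⟩ := h4
      have hlt : t.length ≤ n := by
        have hx := hl; simp [List.length_append, (show ("src='images/".toList).length = 12 from rfl)] at hx; omega
      have hchain : pvChain S ("src='images/".toList ++ t) =
          "src='images/".toList ++ S ++ ['/'] ++ pvChain S t := by
        unfold pvChain
        rw [pvChars_pass "(images/".toList ("(images/".toList ++ (S ++ ['/'])) ("src='images/".toList) (t) (by decide) (pvClean_of_mism "(images/".toList ("src='images/".toList) (by decide))]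
        rw [pvChars_pass "(./images/".toList ("(images/".toList ++ (S ++ ['/'])) ("src='images/".toList) (PySem.Chars.replace (t) "(images/".toList ("(images/".toList ++ (S ++ ['/']))) (by decide) (pvClean_of_mism "(./images/".toList ("src='images/".toList) (by decide))]
        rw [pvChars_pass "src=\"images/".toList ("src=\"images/".toList ++ (S ++ ['/'])) ("src='images/".toList) (PySem.Chars.replace (PySem.Chars.replace (t) "(images/".toList ("(images/".toList ++ (S ++ ['/']))) "(./images/".toList ("(images/".toList ++ (S ++ ['/']))) (by decide) (pvClean_of_mism "src=\"images/".toList ("src='images/".toList) (by decide))]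
        rw [pvChars_head "src='images/".toList ("src='images/".toList ++ (S ++ ['/'])) (PySem.Chars.replace (PySem.Chars.replace (PySem.Chars.replace (t) "(images/".toList ("(images/".toList ++ (S ++ ['/']))) "(./images/".toList ("(images/".toList ++ (S ++ ['/']))) "src=\"images/".toList ("src=\"images/".toList ++ (S ++ ['/']))) (by decide)]
        rw [pvChars_pass "src=\"./images/".toList ("src=\"images/".toList ++ (S ++ ['/'])) ("src='images/".toList ++ (S ++ ['/'])) (PySem.Chars.replace (PySem.Chars.replace (PySem.Chars.replace (PySem.Chars.replace (t) "(images/".toList ("(images/".toList ++ (S ++ ['/']))) "(./images/".toList ("(images/".toList ++ (S ++ ['/']))) "src=\"images/".toList ("src=\"images/".toList ++ (S ++ ['/']))) "src='images/".toList ("src='images/".toList ++ (S ++ ['/']))) (by decide) (pvClean_block "src=\"./images/".toList ("src='images/".toList) S (by decide) (pvKills "src=\"./images/".toList (by decide) (by decide) hc))]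
        rw [pvChars_pass "src='./images/".toList ("src='images/".toList ++ (S ++ ['/'])) ("src='images/".toList ++ (S ++ ['/'])) (PySem.Chars.replace (PySem.Chars.replace (PySem.Chars.replace (PySem.Chars.replace (PySem.Chars.replace (t) "(images/".toList ("(images/".toList ++ (S ++ ['/']))) "(./images/".toList ("(images/".toList ++ (S ++ ['/']))) "src=\"images/".toList ("src=\"images/".toList ++ (S ++ ['/']))) "src='images/".toList ("src='images/".toList ++ (S ++ ['/']))) "src=\"./images/".toList ("src=\"images/".toList ++ (S ++ ['/']))) (by decide) (pvClean_block "src='./images/".toList ("src='images/".toList) S (by decide) (pvKills "src='./images/".toList (by decide) (by decide) hc))]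
        simp [List.append_assoc]
      rw [hchain, ih t hlt, pvScan4]
    by_cases h5 : "src=\"./images/".toList <+: l
    · obtain ⟨t, rfl⟩ := h5
      have hlt : t.length ≤ n := by
        have hx := hl; simp [List.length_append, (show ("src=\"./images/".toList).length = 14 from rfl)] at hx; omega
      have hchain : pvChain S ("src=\"./images/".toList ++ t) =
          "src=\"images/".toList ++ S ++ ['/'] ++ pvChain S t := by
        unfold pvChain
        rw [pvChars_pass "(images/".toList ("(images/".toList ++ (S ++ ['/'])) ("src=\"./images/".toList) (t) (by decide) (pvClean_of_mism "(images/".toList ("src=\"./images/".toList) (by decide))]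
        rw [pvChars_pass "(./images/".toList ("(images/".toList ++ (S ++ ['/'])) ("src=\"./images/".toList) (PySem.Chars.replace (t) "(images/".toList ("(images/".toList ++ (S ++ ['/']))) (by decide) (pvClean_of_mism "(./images/".toList ("src=\"./images/".toList) (by decide))]
        rw [pvChars_pass "src=\"images/".toList ("src=\"images/".toList ++ (S ++ ['/'])) ("src=\"./images/".toList) (PySem.Chars.replace (PySem.Chars.replace (t) "(images/".toList ("(images/".toList ++ (S ++ ['/']))) "(./images/".toList ("(images/".toList ++ (S ++ ['/']))) (by decide) (pvClean_of_mism "src=\"images/".toList ("src=\"./images/".toList) (by decide))]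
        rw [pvChars_pass "src='images/".toList ("src='images/".toList ++ (S ++ ['/'])) ("src=\"./images/".toList) (PySem.Chars.replace (PySem.Chars.replace (PySem.Chars.replace (t) "(images/".toList ("(images/".toList ++ (S ++ ['/']))) "(./images/".toList ("(images/".toList ++ (S ++ ['/']))) "src=\"images/".toList ("src=\"images/".toList ++ (S ++ ['/']))) (by decide) (pvClean_of_mism "src='images/".toList ("src=\"./images/".toList) (by decide))]
        rw [pvChars_head "src=\"./images/".toList ("src=\"images/".toList ++ (S ++ ['/'])) (PySem.Chars.replace (PySem.Chars.replace (PySem.Chars.replace (PySem.Chars.replace (t) "(images/".toList ("(images/".toList ++ (S ++ ['/']))) "(./images/".toList ("(images/".toList ++ (S ++ ['/']))) "src=\"images/".toList ("src=\"images/".toList ++ (S ++ ['/']))) "src='images/".toList ("src='images/".toList ++ (S ++ ['/']))) (by decide)]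
        rw [pvChars_pass "src='./images/".toList ("src='images/".toList ++ (S ++ ['/'])) ("src=\"images/".toList ++ (S ++ ['/'])) (PySem.Chars.replace (PySem.Chars.replace (PySem.Chars.replace (PySem.Chars.replace (PySem.Chars.replace (t) "(images/".toList ("(images/".toList ++ (S ++ ['/']))) "(./images/".toList ("(images/".toList ++ (S ++ ['/']))) "src=\"images/".toList ("src=\"images/".toList ++ (S ++ ['/']))) "src='images/".toList ("src='images/".toList ++ (S ++ ['/']))) "src=\"./images/".toList ("src=\"images/".toList ++ (S ++ ['/']))) (by decide) (pvClean_block "src='./images/".toList ("src=\"images/".toList) S (by decide) (pvKills "src='./images/".toList (by decide) (by decide) hc))]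
        simp [List.append_assoc]
      rw [hchain, ih t hlt, pvScan5]
    by_cases h6 : "src='./images/".toList <+: l
    · obtain ⟨t, rfl⟩ := h6
      have hlt : t.length ≤ n := by
        have hx := hl; simp [List.length_append, (show ("src='./images/".toList).length = 14 from rfl)] at hx; omega
      have hchain : pvChain S ("src='./images/".toList ++ t) =
          "src='images/".toList ++ S ++ ['/'] ++ pvChain S t := by
        unfold pvChain
        rw [pvChars_pass "(images/".toList ("(images/".toList ++ (S ++ ['/'])) ("src='./images/".toList) (t) (by decide) (pvClean_of_mism "(images/".toList ("src='./images/".toList) (by decide))]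
        rw [pvChars_pass "(./images/".toList ("(images/".toList ++ (S ++ ['/'])) ("src='./images/".toList) (PySem.Chars.replace (t) "(images/".toList ("(images/".toList ++ (S ++ ['/']))) (by decide) (pvClean_of_mism "(./images/".toList ("src='./images/".toList) (by decide))]
        rw [pvChars_pass "src=\"images/".toList ("src=\"images/".toList ++ (S ++ ['/'])) ("src='./images/".toList) (PySem.Chars.replace (PySem.Chars.replace (t) "(images/".toList ("(images/".toList ++ (S ++ ['/']))) "(./images/".toList ("(images/".toList ++ (S ++ ['/']))) (by decide) (pvClean_of_mism "src=\"images/".toList ("src='./images/".toList) (by decide))]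
        rw [pvChars_pass "src='images/".toList ("src='images/".toList ++ (S ++ ['/'])) ("src='./images/".toList) (PySem.Chars.replace (PySem.Chars.replace (PySem.Chars.replace (t) "(images/".toList ("(images/".toList ++ (S ++ ['/']))) "(./images/".toList ("(images/".toList ++ (S ++ ['/']))) "src=\"images/".toList ("src=\"images/".toList ++ (S ++ ['/']))) (by decide) (pvClean_of_mism "src='images/".toList ("src='./images/".toList) (by decide))]
        rw [pvChars_pass "src=\"./images/".toList ("src=\"images/".toList ++ (S ++ ['/'])) ("src='./images/".toList) (PySem.Chars.replace (PySem.Chars.replace (PySem.Chars.replace (PySem.Chars.replace (t) "(images/".toList ("(images/".toList ++ (S ++ ['/']))) "(./images/".toList ("(images/".toList ++ (S ++ ['/']))) "src=\"images/".toList ("src=\"images/".toList ++ (S ++ ['/']))) "src='images/".toList ("src='images/".toList ++ (S ++ ['/']))) (by decide) (pvClean_of_mism "src=\"./images/".toList ("src='./images/".toList) (by decide))]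
        rw [pvChars_head "src='./images/".toList ("src='images/".toList ++ (S ++ ['/'])) (PySem.Chars.replace (PySem.Chars.replace (PySem.Chars.replace (PySem.Chars.replace (PySem.Chars.replace (t) "(images/".toList ("(images/".toList ++ (S ++ ['/']))) "(./images/".toList ("(images/".toList ++ (S ++ ['/']))) "src=\"images/".toList ("src=\"images/".toList ++ (S ++ ['/']))) "src='images/".toList ("src='images/".toList ++ (S ++ ['/']))) "src=\"./images/".toList ("src=\"images/".toList ++ (S ++ ['/']))) (by decide)]
        simp [List.append_assoc]
      rw [hchain, ih t hlt, pvScan6]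
    cases l with
    | nil =>
      rw [pvScan_nil]
      exact pvChain_id S (by decide)
    | cons c t =>
      have hlt : t.length ≤ n := by simp at hl; omega
      have hchain : pvChain S (c :: t) = c :: pvChain S t := by
        unfold pvChain
        have i12 : ¬ "(./images/".toList <+: PySem.Chars.replace (c :: t) "(images/".toList ("(images/".toList ++ (S ++ ['/'])) :=
          pvChars_keep "(images/".toList ("(images/".toList ++ (S ++ ['/'])) ("(./images/".toList) ("(images/".toList) (S ++ ['/']) (by decide) (by decide) rfl (by decide) h2 h1
        have i13 : ¬ "src=\"images/".toList <+: PySem.Chars.replace (c :: t) "(images/".toList ("(images/".toList ++ (S ++ ['/'])) :=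
          pvChars_keep "(images/".toList ("(images/".toList ++ (S ++ ['/'])) ("src=\"images/".toList) ("(images/".toList) (S ++ ['/']) (by decide) (by decide) rfl (by decide) h3 h1
        have i14 : ¬ "src='images/".toList <+: PySem.Chars.replace (c :: t) "(images/".toList ("(images/".toList ++ (S ++ ['/'])) :=
          pvChars_keep "(images/".toList ("(images/".toList ++ (S ++ ['/'])) ("src='images/".toList) ("(images/".toList) (S ++ ['/']) (by decide) (by decide) rfl (by decide) h4 h1
        have i15 : ¬ "src=\"./images/".toList <+: PySem.Chars.replace (c :: t) "(images/".toList ("(images/".toList ++ (S ++ ['/'])) :=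
          pvChars_keep "(images/".toList ("(images/".toList ++ (S ++ ['/'])) ("src=\"./images/".toList) ("(images/".toList) (S ++ ['/']) (by decide) (by decide) rfl (by decide) h5 h1
        have i16 : ¬ "src='./images/".toList <+: PySem.Chars.replace (c :: t) "(images/".toList ("(images/".toList ++ (S ++ ['/'])) :=
          pvChars_keep "(images/".toList ("(images/".toList ++ (S ++ ['/'])) ("src='./images/".toList) ("(images/".toList) (S ++ ['/']) (by decide) (by decide) rfl (by decide) h6 h1
        have i23 : ¬ "src=\"images/".toList <+: PySem.Chars.replace (PySem.Chars.replace (c :: t) "(images/".toList ("(images/".toList ++ (S ++ ['/']))) "(./images/".toList ("(images/".toList ++ (S ++ ['/'])) :=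
          pvChars_keep "(./images/".toList ("(images/".toList ++ (S ++ ['/'])) ("src=\"images/".toList) ("(images/".toList) (S ++ ['/']) (by decide) (by decide) rfl (by decide) i13 i12
        have i24 : ¬ "src='images/".toList <+: PySem.Chars.replace (PySem.Chars.replace (c :: t) "(images/".toList ("(images/".toList ++ (S ++ ['/']))) "(./images/".toList ("(images/".toList ++ (S ++ ['/'])) :=
          pvChars_keep "(./images/".toList ("(images/".toList ++ (S ++ ['/'])) ("src='images/".toList) ("(images/".toList) (S ++ ['/']) (by decide) (by decide) rfl (by decide) i14 i12
        have i25 : ¬ "src=\"./images/".toList <+: PySem.Chars.replace (PySem.Chars.replace (c :: t) "(images/".toList ("(images/".toList ++ (S ++ ['/']))) "(./images/".toList ("(images/".toList ++ (S ++ ['/'])) :=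
          pvChars_keep "(./images/".toList ("(images/".toList ++ (S ++ ['/'])) ("src=\"./images/".toList) ("(images/".toList) (S ++ ['/']) (by decide) (by decide) rfl (by decide) i15 i12
        have i26 : ¬ "src='./images/".toList <+: PySem.Chars.replace (PySem.Chars.replace (c :: t) "(images/".toList ("(images/".toList ++ (S ++ ['/']))) "(./images/".toList ("(images/".toList ++ (S ++ ['/'])) :=
          pvChars_keep "(./images/".toList ("(images/".toList ++ (S ++ ['/'])) ("src='./images/".toList) ("(images/".toList) (S ++ ['/']) (by decide) (by decide) rfl (by decide) i16 i12
        have i34 : ¬ "src='images/".toList <+: PySem.Chars.replace (PySem.Chars.replace (PySem.Chars.replace (c :: t) "(images/".toList ("(images/".toList ++ (S ++ ['/']))) "(./images/".toList ("(images/".toList ++ (S ++ ['/']))) "src=\"images/".toList ("src=\"images/".toList ++ (S ++ ['/'])) :=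
          pvChars_keep "src=\"images/".toList ("src=\"images/".toList ++ (S ++ ['/'])) ("src='images/".toList) ("src=\"images/".toList) (S ++ ['/']) (by decide) (by decide) rfl (by decide) i24 i23
        have i35 : ¬ "src=\"./images/".toList <+: PySem.Chars.replace (PySem.Chars.replace (PySem.Chars.replace (c :: t) "(images/".toList ("(images/".toList ++ (S ++ ['/']))) "(./images/".toList ("(images/".toList ++ (S ++ ['/']))) "src=\"images/".toList ("src=\"images/".toList ++ (S ++ ['/'])) :=
          pvChars_keep "src=\"images/".toList ("src=\"images/".toList ++ (S ++ ['/'])) ("src=\"./images/".toList) ("src=\"images/".toList) (S ++ ['/']) (by decide) (by decide) rfl (by decide) i25 i23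
        have i36 : ¬ "src='./images/".toList <+: PySem.Chars.replace (PySem.Chars.replace (PySem.Chars.replace (c :: t) "(images/".toList ("(images/".toList ++ (S ++ ['/']))) "(./images/".toList ("(images/".toList ++ (S ++ ['/']))) "src=\"images/".toList ("src=\"images/".toList ++ (S ++ ['/'])) :=
          pvChars_keep "src=\"images/".toList ("src=\"images/".toList ++ (S ++ ['/'])) ("src='./images/".toList) ("src=\"images/".toList) (S ++ ['/']) (by decide) (by decide) rfl (by decide) i26 i23
        have i45 : ¬ "src=\"./images/".toList <+: PySem.Chars.replace (PySem.Chars.replace (PySem.Chars.replace (PySem.Chars.replace (c :: t) "(images/".toList ("(images/".toList ++ (S ++ ['/']))) "(./images/".toList ("(images/".toList ++ (S ++ ['/']))) "src=\"images/".toList ("src=\"images/".toList ++ (S ++ ['/']))) "src='images/".toList ("src='images/".toList ++ (S ++ ['/'])) :=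
          pvChars_keep "src='images/".toList ("src='images/".toList ++ (S ++ ['/'])) ("src=\"./images/".toList) ("src='images/".toList) (S ++ ['/']) (by decide) (by decide) rfl (by decide) i35 i34
        have i46 : ¬ "src='./images/".toList <+: PySem.Chars.replace (PySem.Chars.replace (PySem.Chars.replace (PySem.Chars.replace (c :: t) "(images/".toList ("(images/".toList ++ (S ++ ['/']))) "(./images/".toList ("(images/".toList ++ (S ++ ['/']))) "src=\"images/".toList ("src=\"images/".toList ++ (S ++ ['/']))) "src='images/".toList ("src='images/".toList ++ (S ++ ['/'])) :=
          pvChars_keep "src='images/".toList ("src='images/".toList ++ (S ++ ['/'])) ("src='./images/".toList) ("src='images/".toList) (S ++ ['/']) (by decide) (by decide) rfl (by decide) i36 i34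
        have i56 : ¬ "src='./images/".toList <+: PySem.Chars.replace (PySem.Chars.replace (PySem.Chars.replace (PySem.Chars.replace (PySem.Chars.replace (c :: t) "(images/".toList ("(images/".toList ++ (S ++ ['/']))) "(./images/".toList ("(images/".toList ++ (S ++ ['/']))) "src=\"images/".toList ("src=\"images/".toList ++ (S ++ ['/']))) "src='images/".toList ("src='images/".toList ++ (S ++ ['/']))) "src=\"./images/".toList ("src=\"images/".toList ++ (S ++ ['/'])) :=
          pvChars_keep "src=\"./images/".toList ("src=\"images/".toList ++ (S ++ ['/'])) ("src='./images/".toList) ("src=\"images/".toList) (S ++ ['/']) (by decide) (by decide) rfl (by decide) i46 i45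
        have ee1 : PySem.Chars.replace (c :: t) "(images/".toList ("(images/".toList ++ (S ++ ['/'])) = c :: PySem.Chars.replace (t) "(images/".toList ("(images/".toList ++ (S ++ ['/'])) :=
          pvChars_cons "(images/".toList ("(images/".toList ++ (S ++ ['/'])) (by decide) h1
        have ee2 : PySem.Chars.replace (PySem.Chars.replace (c :: t) "(images/".toList ("(images/".toList ++ (S ++ ['/']))) "(./images/".toList ("(images/".toList ++ (S ++ ['/'])) = c :: PySem.Chars.replace (PySem.Chars.replace (t) "(images/".toList ("(images/".toList ++ (S ++ ['/']))) "(./images/".toList ("(images/".toList ++ (S ++ ['/'])) := by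
          rw [ee1]
          exact pvChars_cons "(./images/".toList ("(images/".toList ++ (S ++ ['/'])) (by decide) (by rw [← ee1]; exact i12)
        have ee3 : PySem.Chars.replace (PySem.Chars.replace (PySem.Chars.replace (c :: t) "(images/".toList ("(images/".toList ++ (S ++ ['/']))) "(./images/".toList ("(images/".toList ++ (S ++ ['/']))) "src=\"images/".toList ("src=\"images/".toList ++ (S ++ ['/'])) = c :: PySem.Chars.replace (PySem.Chars.replace (PySem.Chars.replace (t) "(images/".toList ("(images/".toList ++ (S ++ ['/']))) "(./images/".toList ("(images/".toList ++ (S ++ ['/']))) "src=\"images/".toList ("src=\"images/".toList ++ (S ++ ['/'])) := by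
          rw [ee2]
          exact pvChars_cons "src=\"images/".toList ("src=\"images/".toList ++ (S ++ ['/'])) (by decide) (by rw [← ee2]; exact i23)
        have ee4 : PySem.Chars.replace (PySem.Chars.replace (PySem.Chars.replace (PySem.Chars.replace (c :: t) "(images/".toList ("(images/".toList ++ (S ++ ['/']))) "(./images/".toList ("(images/".toList ++ (S ++ ['/']))) "src=\"images/".toList ("src=\"images/".toList ++ (S ++ ['/']))) "src='images/".toList ("src='images/".toList ++ (S ++ ['/'])) = c :: PySem.Chars.replace (PySem.Chars.replace (PySem.Chars.replace (PySem.Chars.replace (t) "(images/".toList ("(images/".toList ++ (S ++ ['/']))) "(./images/".toList ("(images/".toList ++ (S ++ ['/']))) "src=\"images/".toList ("src=\"images/".toList ++ (S ++ ['/']))) "src='images/".toList ("src='images/".toList ++ (S ++ ['/'])) := by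
          rw [ee3]
          exact pvChars_cons "src='images/".toList ("src='images/".toList ++ (S ++ ['/'])) (by decide) (by rw [← ee3]; exact i34)
        have ee5 : PySem.Chars.replace (PySem.Chars.replace (PySem.Chars.replace (PySem.Chars.replace (PySem.Chars.replace (c :: t) "(images/".toList ("(images/".toList ++ (S ++ ['/']))) "(./images/".toList ("(images/".toList ++ (S ++ ['/']))) "src=\"images/".toList ("src=\"images/".toList ++ (S ++ ['/']))) "src='images/".toList ("src='images/".toList ++ (S ++ ['/']))) "src=\"./images/".toList ("src=\"images/".toList ++ (S ++ ['/'])) = c :: PySem.Chars.replace (PySem.Chars.replace (PySem.Chars.replace (PySem.Chars.replace (PySem.Chars.replace (t) "(images/".toList ("(images/".toList ++ (S ++ ['/']))) "(./images/".toList ("(images/".toList ++ (S ++ ['/']))) "src=\"images/".toList ("src=\"images/".toList ++ (S ++ ['/']))) "src='images/".toList ("src='images/".toList ++ (S ++ ['/']))) "src=\"./images/".toList ("src=\"images/".toList ++ (S ++ ['/'])) := by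
          rw [ee4]
          exact pvChars_cons "src=\"./images/".toList ("src=\"images/".toList ++ (S ++ ['/'])) (by decide) (by rw [← ee4]; exact i45)
        have ee6 : PySem.Chars.replace (PySem.Chars.replace (PySem.Chars.replace (PySem.Chars.replace (PySem.Chars.replace (PySem.Chars.replace (c :: t) "(images/".toList ("(images/".toList ++ (S ++ ['/']))) "(./images/".toList ("(images/".toList ++ (S ++ ['/']))) "src=\"images/".toList ("src=\"images/".toList ++ (S ++ ['/']))) "src='images/".toList ("src='images/".toList ++ (S ++ ['/']))) "src=\"./images/".toList ("src=\"images/".toList ++ (S ++ ['/']))) "src='./images/".toList ("src='images/".toList ++ (S ++ ['/'])) = c :: PySem.Chars.replace (PySem.Chars.replace (PySem.Chars.replace (PySem.Chars.replace (PySem.Chars.replace (PySem.Chars.replace (t) "(images/".toList ("(images/".toList ++ (S ++ ['/']))) "(./images/".toList ("(images/".toList ++ (S ++ ['/']))) "src=\"images/".toList ("src=\"images/".toList ++ (S ++ ['/']))) "src='images/".toList ("src='images/".toList ++ (S ++ ['/']))) "src=\"./images/".toList ("src=\"images/".toList ++ (S ++ ['/']))) "src='./images/".toList ("src='images/".toList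 ++ (S ++ ['/'])) := by
          rw [ee5]
          exact pvChars_cons "src='./images/".toList ("src='images/".toList ++ (S ++ ['/'])) (by decide) (by rw [← ee5]; exact i56)
        exact ee6
      rw [hchain, ih t hlt, pvScan_cons S h1 h2 h3 h4 h5 h6]

-- ## bridging the String-level ports to the character level

theorem pvOfList_toList (s : String) : String.ofList s.toList = s := by
  simp [String.ofList]

theorem pvPortA_toList (md_text pdf_stem : String) :
    (rewrite_image_paths_py md_text pdf_stem).toList = pvChain pdf_stem.toList md_text.toList := by
  have hs : ("/" : String).toList = ['/'] := rfl
  simp [rewrite_image_paths_py, pvChain, PySem.Str.toList_replace, String.toList_append, hs]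

-- ===== VERDICT (by name: the statement is the Claim_ definition above) =====
theorem rewrite_image_paths_py_spec : Claim_equal_rewrite_image_paths_py := by
  intro md_text pdf_stem _ hpre
  unfold Spec_rewrite_image_paths_py
  have hA : rewrite_image_paths_py md_text pdf_stem =
      String.ofList (pvChain pdf_stem.toList md_text.toList) := by
    rw [← pvPortA_toList, pvOfList_toList]
  have hB : rewrite_image_paths_py_alt md_text pdf_stem =
      String.ofList (pvScanGo pdf_stem.toList md_text.toList) := rfl
  rw [hA, hB]
  rcases hpre with hc | hno
  · rw [pvChain_eq pdf_stem.toList hc md_text.toList.length md_text.toList le_rfl]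
  · rw [pvChain_id pdf_stem.toList hno, pvScan_id pdf_stem.toList md_text.toList hno]
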